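-- pv_equiv track=rewrite | github.com/GWeber1/Python | Tetris_python/Tetris_python.py | criar_area
-- ===== SOURCE A (Python) =====
-- cor_preta = (0,0,0)
--
-- def criar_area(posicao={}):
--     area = [[(cor_preta) for _ in range(10)] for _ in range(20)] #Criação da área de jogo
--
--     for i in range(len(area)):
--         for j in range(len(area[i])):
--             if (j,i) in posicao:
--                 c = posicao[(j,i)]
--                 area[i][j] = c
--     return area
-- ===== SOURCE B (Python) =====
-- cor_preta = (0, 0, 0)
--
-- def criar_area(posicao={}):
--     area = [[cor_preta] * 10 for _ in range(20)]
--     for (j, i), c in posicao.items():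
--         if 0 <= i < 20 and 0 <= j < 10:
--             area[i][j] = c
--     return area
-- ===== Notes on version B (the rewrite author's own statement) =====
-- stated objective: idiomatic
-- what changed: Instead of scanning all 200 cells and testing each (j,i) for dict membership, B iterates once over posicao.items() and writes each colour at its cell (with a bounds check so out-of-grid keys are ignored, as A's membership scan does); Pre_ excludes association lists with duplicate (j,i) keys, which cannot arise from a Python dict and whose first-vs-last-match value is an artefact of the encoding.
import Mathlib
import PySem

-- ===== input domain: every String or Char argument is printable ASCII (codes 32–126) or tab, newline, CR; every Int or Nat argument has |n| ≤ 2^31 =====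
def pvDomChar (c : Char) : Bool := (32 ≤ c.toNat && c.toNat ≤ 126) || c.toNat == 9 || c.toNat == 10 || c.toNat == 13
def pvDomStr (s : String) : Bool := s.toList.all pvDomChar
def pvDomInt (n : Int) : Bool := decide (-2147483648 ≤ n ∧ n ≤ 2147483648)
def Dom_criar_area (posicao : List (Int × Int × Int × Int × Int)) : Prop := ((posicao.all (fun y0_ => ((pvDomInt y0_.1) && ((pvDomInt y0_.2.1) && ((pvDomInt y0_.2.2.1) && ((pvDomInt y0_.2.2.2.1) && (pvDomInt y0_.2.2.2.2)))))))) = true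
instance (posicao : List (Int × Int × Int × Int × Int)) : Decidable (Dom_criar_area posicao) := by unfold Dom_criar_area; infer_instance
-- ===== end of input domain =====

-- B replaces A's scan of all 200 cells (membership test per cell) by one pass over posicao's
-- items, writing each colour at its cell (bounds-checked); idiomatic, same return value.

-- ===== PORT A =====
-- dict membership/lookup `(j,i) in posicao` / `posicao[(j,i)]`: first match in the assoc list
def aLookup : List (Int × Int × Int × Int × Int) → Int → Int → Option (Int × Int × Int)
  | [], _, _ => none
  | (j', i', r, g, b) :: t, j, i => if j' = j ∧ i' = i then some (r, g, b) else aLookup t j i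

-- body of A's inner loop: `if (j,i) in posicao: area[i][j] = posicao[(j,i)]`
def aStep (posicao : List (Int × Int × Int × Int × Int)) (i : Int)
    (area : List (List (Int × Int × Int))) (j : Int) : List (List (Int × Int × Int)) :=
  match aLookup posicao j i with
  | some c => area.modify i.toNat (fun row => row.set j.toNat c)
  | none => area

def criar_area (posicao : List (Int × Int × Int × Int × Int)) : List (List (Int × Int × Int)) :=
  let area := List.replicate 20 (List.replicate 10 ((0 : Int), (0 : Int), (0 : Int)))
  (PySem.List.pyRange 0 (area.length : Int) 1).foldl
    (fun area i =>
      (PySem.List.pyRange 0 (((PySem.List.pyGet? area i).getD []).length : Int) 1).foldl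
        (aStep posicao i) area)
    area

-- ===== PORT B =====
-- body of B's loop: `for (j,i), c in posicao.items(): if in bounds: area[i][j] = c`
def bStep (area : List (List (Int × Int × Int))) (q : Int × Int × Int × Int × Int) :
    List (List (Int × Int × Int)) :=
  if 0 ≤ q.2.1 ∧ q.2.1 < 20 ∧ 0 ≤ q.1 ∧ q.1 < 10 then
    area.modify q.2.1.toNat (fun row => row.set q.1.toNat (q.2.2.1, q.2.2.2.1, q.2.2.2.2))
  else area

def criar_area_alt (posicao : List (Int × Int × Int × Int × Int)) : List (List (Int × Int × Int)) :=
  posicao.foldl bStep (List.replicate 20 (List.replicate 10 ((0 : Int), (0 : Int), (0 : Int))))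

-- ===== PRECONDITION & SPEC =====
def pvKey (q : Int × Int × Int × Int × Int) : Int × Int := (q.1, q.2.1)

-- Pre_ excludes association lists with duplicate (j,i) keys: they encode no Python dict
-- (a dict cannot hold a key twice), and first-vs-last-match there is an artefact of the encoding.
def Pre_criar_area (posicao : List (Int × Int × Int × Int × Int)) : Prop :=
  (posicao.map pvKey).Nodup
instance (posicao : List (Int × Int × Int × Int × Int)) : Decidable (Pre_criar_area posicao) := by
  unfold Pre_criar_area; infer_instance

def pvWitness_criar_area : (List (Int × Int × Int × Int × Int)) := [(1, 2, 250, 100, 0), (0, 0, 10, 20, 30)]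

def Spec_criar_area (posicao : List (Int × Int × Int × Int × Int)) (out : List (List (Int × Int × Int))) : Prop := out = criar_area_alt posicao
instance (posicao : List (Int × Int × Int × Int × Int)) (out : List (List (Int × Int × Int))) : Decidable (Spec_criar_area posicao out) := by unfold Spec_criar_area; infer_instance

-- ===== CLAIM (what is proved, stated in full; the proofs are below) =====
def Claim_equal_criar_area : Prop := ∀ (posicao : List (Int × Int × Int × Int × Int)), Dom_criar_area posicao → Pre_criar_area posicao → Spec_criar_area posicao (criar_area posicao)

-- ===== LEMMAS AND PROOFS =====
def pvBlack : Int × Int × Int := (0, 0, 0)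

def pvCell (p : List (Int × Int × Int × Int × Int)) (i m : Int) : Int × Int × Int :=
  (aLookup p m i).getD pvBlack

def pvRStep (p : List (Int × Int × Int × Int × Int)) (i : Int)
    (row : List (Int × Int × Int)) (j : Int) : List (Int × Int × Int) :=
  match aLookup p j i with
  | some c => row.set j.toNat c
  | none => row

def pvR (p : List (Int × Int × Int × Int × Int)) (i : Int) (t : Nat) : List (Int × Int × Int) :=
  (List.range 10).map (fun m => if m < t then pvCell p i (m : Int) else pvBlack)

def pvG (p : List (Int × Int × Int × Int × Int)) (t : Nat) : List (List (Int × Int × Int)) :=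
  (List.range 20).map (fun k => if k < t then pvR p (k : Int) 10 else List.replicate 10 pvBlack)

lemma pv_modify_modify {α : Type} (a : List α) (n : Nat) (f g : α → α) :
    (a.modify n f).modify n g = a.modify n (fun x => g (f x)) := by
  apply List.ext_getElem
  · simp [List.length_modify]
  · intro i h1 h2
    simp only [List.getElem_modify]
    split <;> rfl

lemma pv_getD_modify {α : Type} (a : List α) (n k : Nat) (f : α → α) (d : α) :
    (a.modify n f).getD k d = if n = k ∧ k < a.length then f (a.getD k d) else a.getD k d := by
  by_cases hk : k < a.length
  · rw [List.getD_eq_getElem _ _ (by simpa [List.length_modify] using hk),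
      List.getD_eq_getElem _ _ hk, List.getElem_modify]
    by_cases hnk : n = k <;> simp [hnk, hk]
  · have h1 : (a.modify n f)[k]? = none :=
      List.getElem?_eq_none (by simp [List.length_modify]; omega)
    have h2 : a[k]? = none := List.getElem?_eq_none (by omega)
    simp [List.getD_eq_getElem?_getD, h1, h2, hk]

lemma pv_getD_set {α : Type} (l : List α) (i k : Nat) (v d : α) :
    (l.set i v).getD k d = if i = k ∧ k < l.length then v else l.getD k d := by
  simp only [List.getD_eq_getElem?_getD, List.getElem?_set]
  by_cases hik : i = k
  · subst hik
    by_cases hk : i < l.length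
    · simp [hk]
    · simp [hk, List.getElem?_eq_none (by omega : l.length ≤ i)]
  · simp [hik]

lemma pv_factor (L : List Int) (p : List (Int × Int × Int × Int × Int)) (i : Int)
    (a : List (List (Int × Int × Int))) :
    L.foldl (aStep p i) a = a.modify i.toNat (fun row => L.foldl (pvRStep p i) row) := by
  induction L generalizing a with
  | nil => simp only [List.foldl_nil]; exact (List.modify_id _ _).symm
  | cons j L ih =>
    simp only [List.foldl_cons]
    rw [ih]
    cases h : aLookup p j i with
    | none => simp [aStep, pvRStep, h]
    | some c => simp only [aStep, pvRStep, h]; rw [pv_modify_modify]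

lemma pvR_step (p : List (Int × Int × Int × Int × Int)) (i : Int) (t : Nat) (ht : t < 10) :
    pvRStep p i (pvR p i t) (t : Int) = pvR p i (t + 1) := by
  cases h : aLookup p (t : Int) i with
  | none =>
    simp only [pvRStep, h, pvR]
    apply List.map_congr_left
    intro m hm
    by_cases hmt : m = t
    · subst hmt; simp [pvCell, h]
    · by_cases hlt : m < t
      · simp [hlt, Nat.lt_succ_of_lt hlt]
      · have : ¬ m < t + 1 := by omega
        simp [hlt, this]
  | some c =>
    simp only [pvRStep, h]
    apply List.ext_getElem
    · simp [pvR]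
    · intro m h1 h2
      have hm : m < 10 := by simpa [pvR] using h2
      rw [List.getElem_set]
      simp only [Int.toNat_natCast, pvR, List.getElem_map, List.getElem_range]
      by_cases hmt : t = m
      · subst hmt; simp [pvCell, h]
      · by_cases hlt : m < t
        · simp [hmt, hlt, Nat.lt_succ_of_lt hlt]
        · have : ¬ m < t + 1 := by omega
          simp [hmt, hlt, this]

lemma pv_rowfold (p : List (Int × Int × Int × Int × Int)) (i : Int) :
    ∀ (n t : Nat), t + n = 10 →
      (PySem.List.pyRange (t : Int) 10 1).foldl (pvRStep p i) (pvR p i t) = pvR p i 10 := by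
  intro n
  induction n with
  | zero =>
    intro t ht
    have h10 : t = 10 := by omega
    subst h10
    rw [PySem.List.pyRange_one_eq_nil (by norm_num)]
    rfl
  | succ n ih =>
    intro t ht
    have hlt : (t : Int) < 10 := by exact_mod_cast (by omega : t < 10)
    rw [PySem.List.pyRange_one_cons hlt]
    simp only [List.foldl_cons]
    rw [pvR_step p i t (by omega)]
    have hc : (t : Int) + 1 = ((t + 1 : Nat) : Int) := by push_cast; ring
    rw [hc, ih (t + 1) (by omega)]

lemma pvR_zero (p : List (Int × Int × Int × Int × Int)) (i : Int) :
    pvR p i 0 = List.replicate 10 pvBlack := by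
  simp [pvR, List.map_const']

lemma pv_inner_bound (p : List (Int × Int × Int × Int × Int)) (t : Nat) (ht : t < 20) :
    ((PySem.List.pyGet? (pvG p t) (t : Int)).getD []).length = 10 := by
  rw [PySem.List.pyGet?_natCast]
  have hlen : t < (pvG p t).length := by simp [pvG]; omega
  rw [List.getElem?_eq_getElem hlen]
  simp [pvG, List.getElem_map, List.getElem_range]

lemma pvG_step (p : List (Int × Int × Int × Int × Int)) (t : Nat) (ht : t < 20) :
    (pvG p t).modify t
      (fun row => (PySem.List.pyRange 0 10 1).foldl (pvRStep p (t : Int)) row) = pvG p (t + 1) := by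
  apply List.ext_getElem
  · simp [List.length_modify, pvG]
  · intro k h1 h2
    have hk : k < 20 := by simpa [pvG] using h2
    rw [List.getElem_modify]
    simp only [pvG, List.getElem_map, List.getElem_range]
    by_cases hkt : t = k
    · subst hkt
      have hrow : (if t < t then pvR p (t : Int) 10 else List.replicate 10 pvBlack)
          = pvR p (t : Int) 0 := by simp [pvR_zero]
      rw [hrow]
      have h0 : ((0 : Nat) : Int) = (0 : Int) := by norm_num
      have := pv_rowfold p (t : Int) 10 0 (by omega)
      rw [h0] at this
      simp [this]
    · by_cases hlt : k < t
      · simp [hkt, hlt, Nat.lt_succ_of_lt hlt]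
      · have : ¬ k < t + 1 := by omega
        simp [hkt, hlt, this]

lemma pv_outerfold (p : List (Int × Int × Int × Int × Int)) :
    ∀ (n t : Nat), t + n = 20 →
      (PySem.List.pyRange (t : Int) 20 1).foldl
        (fun area i =>
          (PySem.List.pyRange 0 (((PySem.List.pyGet? area i).getD []).length : Int) 1).foldl
            (aStep p i) area)
        (pvG p t) = pvG p 20 := by
  intro n
  induction n with
  | zero =>
    intro t ht
    have h20 : t = 20 := by omega
    subst h20
    rw [PySem.List.pyRange_one_eq_nil (by norm_num)]
    rfl
  | succ n ih =>
    intro t ht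
    have hlt : (t : Int) < 20 := by exact_mod_cast (by omega : t < 20)
    rw [PySem.List.pyRange_one_cons hlt]
    simp only [List.foldl_cons]
    rw [pv_inner_bound p t (by omega)]
    have h10 : ((10 : Nat) : Int) = (10 : Int) := by norm_num
    rw [h10, pv_factor, Int.toNat_natCast, pvG_step p t (by omega)]
    have hc : (t : Int) + 1 = ((t + 1 : Nat) : Int) := by push_cast; ring
    rw [hc, ih (t + 1) (by omega)]

lemma pv_A_eq (p : List (Int × Int × Int × Int × Int)) : criar_area p = pvG p 20 := by
  have h0 : List.replicate 20 (List.replicate 10 ((0 : Int), (0 : Int), (0 : Int))) = pvG p 0 := by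
    simp [pvG, pvBlack, List.map_const']
  simp only [criar_area]
  rw [h0]
  have hlen : (((pvG p 0).length : Nat) : Int) = (20 : Int) := by simp [pvG]
  rw [hlen]
  have h := pv_outerfold p 20 0 (by omega)
  rw [show ((0 : Nat) : Int) = (0 : Int) from rfl] at h
  exact h

lemma aLookup_eq_none (t : List (Int × Int × Int × Int × Int)) (j i : Int)
    (h : (j, i) ∉ t.map pvKey) : aLookup t j i = none := by
  induction t with
  | nil => rfl
  | cons q t ih =>
    obtain ⟨j', i', r, g, b⟩ := q
    simp only [List.map_cons, List.mem_cons, not_or] at h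
    simp only [aLookup]
    rw [if_neg, ih h.2]
    intro ⟨h1, h2⟩
    exact h.1 (by simp [pvKey, h1, h2])

lemma bStep_length (a : List (List (Int × Int × Int))) (q : Int × Int × Int × Int × Int) :
    (bStep a q).length = a.length := by
  unfold bStep; split <;> simp [List.length_modify]

lemma bStep_rowlen (a : List (List (Int × Int × Int))) (q : Int × Int × Int × Int × Int)
    (k : Nat) : ((bStep a q).getD k []).length = (a.getD k []).length := by
  unfold bStep
  split
  · rw [pv_getD_modify]
    split <;> simp [List.length_set]
  · rfl

lemma bfold_length (p : List (Int × Int × Int × Int × Int)) (a : List (List (Int × Int × Int))) :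
    (p.foldl bStep a).length = a.length := by
  induction p generalizing a with
  | nil => rfl
  | cons q t ih => simp only [List.foldl_cons]; rw [ih, bStep_length]

lemma bfold_rowlen (p : List (Int × Int × Int × Int × Int)) (a : List (List (Int × Int × Int)))
    (k : Nat) : ((p.foldl bStep a).getD k []).length = (a.getD k []).length := by
  induction p generalizing a with
  | nil => rfl
  | cons q t ih => simp only [List.foldl_cons]; rw [ih, bStep_rowlen]

lemma bfold_getD (p : List (Int × Int × Int × Int × Int)) :
    ∀ (a : List (List (Int × Int × Int))), (p.map pvKey).Nodup →
      ∀ (k m : Nat), k < 20 → m < 10 → a.length = 20 → (a.getD k []).length = 10 →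
        ((p.foldl bStep a).getD k []).getD m pvBlack
          = (aLookup p (m : Int) (k : Int)).getD ((a.getD k []).getD m pvBlack) := by
  induction p with
  | nil => intro a _ k m _ _ _ _; rfl
  | cons q t ih =>
    intro a hnd k m hk hm ha hr
    have hq : pvKey q ∉ t.map pvKey := by
      simp only [List.map_cons, List.nodup_cons] at hnd; exact hnd.1
    have hnd' : (t.map pvKey).Nodup := by
      simp only [List.map_cons, List.nodup_cons] at hnd; exact hnd.2
    simp only [List.foldl_cons]
    obtain ⟨j, i, r, g, b⟩ := q
    by_cases hkey : j = (m : Int) ∧ i = (k : Int)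
    · -- the head item colours exactly cell (k, m)
      obtain ⟨hj, hi⟩ := hkey
      have hrange : (0 : Int) ≤ i ∧ i < 20 ∧ (0 : Int) ≤ j ∧ j < 10 :=
        ⟨by rw [hi]; exact Int.natCast_nonneg k,
         by rw [hi]; exact_mod_cast hk,
         by rw [hj]; exact Int.natCast_nonneg m,
         by rw [hj]; exact_mod_cast hm⟩
      have hb : bStep a (j, i, r, g, b) = a.modify k (fun row => row.set m (r, g, b)) := by
        unfold bStep
        rw [if_pos hrange]
        simp [hi, hj, Int.toNat_natCast]
      rw [hb, ih _ hnd' k m hk hm (by simp [List.length_modify, ha])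
        (by rw [pv_getD_modify, if_pos ⟨rfl, by omega⟩, List.length_set]; exact hr)]
      have hnone : aLookup t (m : Int) (k : Int) = none := by
        apply aLookup_eq_none
        have : pvKey (j, i, r, g, b) = ((m : Int), (k : Int)) := by simp [pvKey, hj, hi]
        rw [← this]; exact hq
      rw [hnone]
      simp only [aLookup]
      rw [if_pos ⟨hj, hi⟩, pv_getD_modify, if_pos ⟨rfl, by omega⟩, pv_getD_set,
        if_pos ⟨rfl, by omega⟩]
      rfl
    · -- the head item leaves cell (k, m) unchanged
      have htail : aLookup ((j, i, r, g, b) :: t) (m : Int) (k : Int)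
          = aLookup t (m : Int) (k : Int) := by
        simp only [aLookup]
        rw [if_neg hkey]
      have hcell : ((bStep a (j, i, r, g, b)).getD k []).getD m pvBlack
          = (a.getD k []).getD m pvBlack := by
        unfold bStep
        by_cases hrg : (0 : Int) ≤ i ∧ i < 20 ∧ (0 : Int) ≤ j ∧ j < 10
        · rw [if_pos hrg]
          obtain ⟨hi0, hi20, hj0, hj10⟩ := hrg
          rw [pv_getD_modify]
          by_cases hik : i.toNat = k ∧ k < a.length
          · rw [if_pos hik]
            obtain ⟨hik1, _⟩ := hik
            have hieq : i = (k : Int) := by omega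
            have hjne : ¬ (j.toNat = m ∧ m < (a.getD k []).length) := by
              intro ⟨hjm, _⟩
              exact hkey ⟨by omega, hieq⟩
            rw [pv_getD_set, if_neg hjne]
          · rw [if_neg hik]
        · rw [if_neg hrg]
      rw [ih _ hnd' k m hk hm (by rw [bStep_length, ha]) (by rw [bStep_rowlen, hr]), hcell, htail]

lemma pv_B_eq (p : List (Int × Int × Int × Int × Int)) (hnd : (p.map pvKey).Nodup) :
    criar_area_alt p = pvG p 20 := by
  unfold criar_area_alt
  have ha : (List.replicate 20 (List.replicate 10 ((0 : Int), (0 : Int), (0 : Int)))).length = 20 := by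
    simp
  have hrow0 : ∀ k : Nat, k < 20 →
      ((List.replicate 20 (List.replicate 10 ((0 : Int), (0 : Int), (0 : Int)))).getD k []).length = 10 := by
    intro k hk
    rw [List.getD_replicate _ hk]; simp
  have rowsEq : ∀ k : Nat, k < 20 →
      (p.foldl bStep (List.replicate 20 (List.replicate 10 ((0 : Int), (0 : Int), (0 : Int))))).getD k []
        = pvR p (k : Int) 10 := by
    intro k hk
    apply List.ext_getElem
    · rw [bfold_rowlen, hrow0 k hk]; simp [pvR]
    · intro m hm1 hm2
      have hm : m < 10 := by simpa [pvR] using hm2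
      rw [← List.getD_eq_getElem _ pvBlack hm1,
        bfold_getD p _ hnd k m hk hm ha (hrow0 k hk), List.getD_replicate _ hk,
        show (List.replicate 10 ((0 : Int), (0 : Int), (0 : Int))).getD m pvBlack = pvBlack from by
          rw [List.getD_replicate _ hm]; rfl]
      simp [pvR, List.getElem_map, List.getElem_range, hm, pvCell]
  apply List.ext_getElem
  · rw [bfold_length, ha]; simp [pvG]
  · intro k h1 h2
    have hk : k < 20 := by simpa [pvG] using h2
    rw [← List.getD_eq_getElem _ [] h1, rowsEq k hk]
    simp [pvG, List.getElem_map, List.getElem_range, hk]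

-- ===== VERDICT (by name: the statement is the Claim_ definition above) =====
theorem criar_area_spec : Claim_equal_criar_area := by
  intro posicao _ hpre
  unfold Spec_criar_area
  rw [pv_A_eq, pv_B_eq posicao hpre]
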